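-- pv_equiv track=rewrite | github.com/renjieliu/leetcode | 0600_0999/629.py | kInversePairs
-- ===== SOURCE A (Python) =====
-- def kInversePairs(n: int, k: int) -> int: #RL 20220716: copied solution, O( N*k | N*k )
--     mod = 10**9 + 7
--
--     f = [1] + [0] * k
--     for i in range(1, n + 1):
--         g = [0] * (k + 1)
--         for j in range(k + 1):
--             g[j] = (g[j - 1] if j - 1 >= 0 else 0) - (f[j - i] if j - i >= 0 else 0) + f[j]
--             g[j] %= mod
--         f = g
--
--     return f[k]
-- ===== SOURCE B (Python) =====
-- def kInversePairs(n: int, k: int) -> int: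
--     mod = 10**9 + 7
--
--     f = [1] + [0] * k
--     for i in range(1, n + 1):
--         # pass 1: materialize the mod-reduced prefix-sum table of f
--         P = []
--         acc = 0
--         for x in f:
--             acc = (acc + x) % mod
--             P.append(acc)
--         # pass 2: windowed subtraction against the table
--         f = [(P[j] - (P[j - i] if j - i >= 0 else 0)) % mod for j in range(k + 1)]
--
--     return f[k]
-- ===== Notes on version B (the rewrite author's own statement) =====
-- stated objective: alternative
-- what changed: The inner update no longer carries a running accumulator g[j-1] with per-step add/subtract; instead each outer iteration first builds an explicit mod-reduced prefix-sum table P of f in one pass over the elements, then produces the new row by a pure windowed lookup P[j]-P[j-i] in a second pass (a list comprehension), instead of A's in-place recurrence writing into a preallocated row.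
import Mathlib
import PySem

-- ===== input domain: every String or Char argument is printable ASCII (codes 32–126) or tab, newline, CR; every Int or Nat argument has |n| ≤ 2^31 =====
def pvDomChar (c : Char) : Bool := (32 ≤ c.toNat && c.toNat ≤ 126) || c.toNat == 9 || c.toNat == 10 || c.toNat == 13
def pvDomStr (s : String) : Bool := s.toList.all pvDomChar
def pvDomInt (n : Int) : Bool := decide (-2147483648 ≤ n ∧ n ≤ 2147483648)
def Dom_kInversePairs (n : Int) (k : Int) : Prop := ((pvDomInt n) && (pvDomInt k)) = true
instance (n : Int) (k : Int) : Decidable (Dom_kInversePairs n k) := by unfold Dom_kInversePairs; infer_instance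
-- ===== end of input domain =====

-- B replaces A's in-place running-accumulator row update by an explicit prefix-sum table
-- built in one pass plus a windowed-subtraction map (objective: alternative decomposition).

-- ===== PORT A =====
def kInversePairs (n : Int) (k : Int) : Int :=
  PySem.List.pyGetD
    ((PySem.List.pyRange 1 (n + 1) 1).foldl
      (fun f i =>
        (PySem.List.pyRange 0 (k + 1) 1).foldl
          (fun g j =>
            let v : Int :=
              (if j - 1 ≥ 0 then PySem.List.pyGetD g (j - 1) 0 else 0)
                - (if j - i ≥ 0 then PySem.List.pyGetD f (j - i) 0 else 0)
                + PySem.List.pyGetD f j 0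
            let g' := PySem.List.pySetD g j v
            PySem.List.pySetD g' j
              (PySem.Int.mod (PySem.List.pyGetD g' j 0) (10 ^ 9 + 7)))
          (List.replicate (k + 1).toNat 0))
      (1 :: List.replicate k.toNat 0))
    k 0

-- ===== PORT B =====
def kInversePairs_alt (n : Int) (k : Int) : Int :=
  PySem.List.pyGetD
    ((PySem.List.pyRange 1 (n + 1) 1).foldl
      (fun f i =>
        let P : List Int :=
          (f.foldl
            (fun (st : Int × List Int) x =>
              let acc := PySem.Int.mod (st.1 + x) (10 ^ 9 + 7)
              (acc, st.2 ++ [acc]))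
            (0, ([] : List Int))).2
        (PySem.List.pyRange 0 (k + 1) 1).map
          (fun j =>
            PySem.Int.mod
              (PySem.List.pyGetD P j 0
                - (if j - i ≥ 0 then PySem.List.pyGetD P (j - i) 0 else 0))
              (10 ^ 9 + 7)))
      (1 :: List.replicate k.toNat 0))
    k 0

-- ===== PRECONDITION & SPEC =====
-- Pre_ excludes exactly the inputs on which the Python A raises IndexError
-- (k ≤ -2, or k = -1 with n ≥ 1); A returns on every admitted input.
def Pre_kInversePairs (n : Int) (k : Int) : Prop := 0 ≤ k ∨ (k = -1 ∧ n ≤ 0)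
instance (n : Int) (k : Int) : Decidable (Pre_kInversePairs n k) := by
  unfold Pre_kInversePairs; infer_instance

def pvWitness_kInversePairs : Int × Int := (3, 2)

def Spec_kInversePairs (n : Int) (k : Int) (out : Int) : Prop := out = kInversePairs_alt n k
instance (n : Int) (k : Int) (out : Int) : Decidable (Spec_kInversePairs n k out) := by
  unfold Spec_kInversePairs; infer_instance

-- ===== CLAIM (what is proved, stated in full; the proofs are below) =====
def Claim_equal_kInversePairs : Prop :=
  ∀ (n : Int) (k : Int), Dom_kInversePairs n k → Pre_kInversePairs n k →
    Spec_kInversePairs n k (kInversePairs n k)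

-- ===== LEMMAS AND PROOFS =====

-- the modulus
def pvM : Int := 10 ^ 9 + 7

-- unreduced prefix sum: pref f t = f[0] + … + f[t] (0 for t < 0)
def pvPref (f : List Int) (t : Int) : Int := (f.take (t + 1).toNat).sum

-- the common value of both inner passes, as a function of the column index
def pvFun (f : List Int) (i : Int) (j : Int) : Int :=
  (pvPref f j - pvPref f (j - i)) % pvM

-- the common row both inner passes produce
def pvRow (k : Int) (f : List Int) (i : Int) : List Int :=
  (PySem.List.pyRange 0 (k + 1) 1).map (pvFun f i)

-- A's inner step, named (syntactically identical to the lambda in the port)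
def pvStepA (k : Int) (f : List Int) (i : Int) : List Int :=
  (PySem.List.pyRange 0 (k + 1) 1).foldl
    (fun g j =>
      let v : Int :=
        (if j - 1 ≥ 0 then PySem.List.pyGetD g (j - 1) 0 else 0)
          - (if j - i ≥ 0 then PySem.List.pyGetD f (j - i) 0 else 0)
          + PySem.List.pyGetD f j 0
      let g' := PySem.List.pySetD g j v
      PySem.List.pySetD g' j
        (PySem.Int.mod (PySem.List.pyGetD g' j 0) (10 ^ 9 + 7)))
    (List.replicate (k + 1).toNat 0)

-- B's inner step, named (syntactically identical to the lambda in the port)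
def pvStepB (k : Int) (f : List Int) (i : Int) : List Int :=
  let P : List Int :=
    (f.foldl
      (fun (st : Int × List Int) x =>
        let acc := PySem.Int.mod (st.1 + x) (10 ^ 9 + 7)
        (acc, st.2 ++ [acc]))
      (0, ([] : List Int))).2
  (PySem.List.pyRange 0 (k + 1) 1).map
    (fun j =>
      PySem.Int.mod
        (PySem.List.pyGetD P j 0
          - (if j - i ≥ 0 then PySem.List.pyGetD P (j - i) 0 else 0))
        (10 ^ 9 + 7))

theorem pvA_eq (n k : Int) :
    kInversePairs n k =
      PySem.List.pyGetD
        ((PySem.List.pyRange 1 (n + 1) 1).foldl (fun f i => pvStepA k f i)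
          (1 :: List.replicate k.toNat 0)) k 0 := rfl

theorem pvB_eq (n k : Int) :
    kInversePairs_alt n k =
      PySem.List.pyGetD
        ((PySem.List.pyRange 1 (n + 1) 1).foldl (fun f i => pvStepB k f i)
          (1 :: List.replicate k.toNat 0)) k 0 := rfl

-- PySem.Int.mod by the positive modulus is %
theorem pvMod_eq (a : Int) : PySem.Int.mod a (10 ^ 9 + 7) = a % pvM :=
  PySem.Int.mod_eq_emod_of_pos (a := a) (b := 10 ^ 9 + 7) (by norm_num)

theorem pvPref_neg (f : List Int) (t : Int) (h : t < 0) : pvPref f t = 0 := by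
  unfold pvPref
  have : (t + 1).toNat = 0 := by omega
  simp [this]

theorem pvPref_succ (f : List Int) (t : Int) (h0 : 0 ≤ t) (h1 : t < f.length) :
    pvPref f t = pvPref f (t - 1) + f.getD t.toNat 0 := by
  unfold pvPref
  have ht : (t + 1).toNat = t.toNat + 1 := by omega
  have ht' : (t - 1 + 1).toNat = t.toNat := by omega
  have hlt : t.toNat < f.length := by omega
  rw [ht, ht', List.take_add_one, List.sum_append]
  simp [List.getD, hlt]

-- generic fold congruence under an invariant
theorem pvFoldCongr {α β : Type} (P : α → Prop) (sa sb : α → β → α) (l : List β)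
    (h : ∀ a b, P a → b ∈ l → sa a b = sb a b ∧ P (sa a b)) :
    ∀ a, P a → l.foldl sa a = l.foldl sb a ∧ P (l.foldl sa a) := by
  induction l with
  | nil => intro a ha; exact ⟨rfl, ha⟩
  | cons x xs ih =>
    intro a ha
    obtain ⟨heq, hp⟩ := h a x ha (List.mem_cons_self)
    have := ih (fun a b hpa hb => h a b hpa (List.mem_cons_of_mem _ hb)) (sa a x) hp
    simp only [List.foldl_cons, heq] at this ⊢
    exact ⟨this.1, heq ▸ this.2⟩

theorem pvRow_length (K : Nat) (f : List Int) (i : Int) :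
    (pvRow (K : Int) f i).length = K + 1 := by
  simp [pvRow, PySem.List.length_pyRange_one]

-- the prefix-table fold of B, characterized
theorem pvPrefixFold (f : List Int) : ∀ (a0 : Int) (acc : List Int),
    ((f.foldl
      (fun (st : Int × List Int) x =>
        let acc := PySem.Int.mod (st.1 + x) (10 ^ 9 + 7)
        (acc, st.2 ++ [acc]))
      (a0, acc)).2)
      = acc ++ (List.range f.length).map (fun t => (a0 + (f.take (t + 1)).sum) % pvM) := by
  induction f with
  | nil => intro a0 acc; simp
  | cons x xs ih =>
    intro a0 acc
    simp only [List.foldl_cons]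
    rw [ih]
    rw [List.length_cons, List.range_succ_eq_map]
    simp only [List.map_cons, List.map_map, pvMod_eq, List.append_assoc]
    congr 1
    simp only [List.singleton_append]
    congr 1
    · simp
    · apply List.map_congr_left
      intro t _
      simp only [Function.comp_def]
      rw [Int.emod_add_emod]
      congr 1
      simp only [List.take_succ_cons, List.sum_cons]
      ring

theorem pvStepB_eq_row (K : Nat) (f : List Int) (i : Int)
    (hf : f.length = K + 1) (hi : 1 ≤ i) :
    pvStepB (K : Int) f i = pvRow (K : Int) f i := by
  unfold pvStepB pvRow
  have hP := pvPrefixFold f 0 []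
  simp only [List.nil_append, zero_add] at hP
  set P := (f.foldl
      (fun (st : Int × List Int) x =>
        let acc := PySem.Int.mod (st.1 + x) (10 ^ 9 + 7)
        (acc, st.2 ++ [acc]))
      (0, ([] : List Int))).2 with hPdef
  have hPlen : P.length = K + 1 := by rw [hP]; simp [hf]
  have hPget : ∀ j : Int, 0 ≤ j → j < (K : Int) + 1 →
      PySem.List.pyGetD P j 0 = pvPref f j % pvM := by
    intro j hj0 hj1
    rw [PySem.List.pyGetD_eq_getElem _ _ hj0 (by omega)]
    have hjl : j.toNat < f.length := by omega
    simp only [hP, List.getElem_map, List.getElem_range]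
    unfold pvPref
    have hjt : (j + 1).toNat = j.toNat + 1 := by omega
    simp [hjt]
  apply List.map_congr_left
  intro j hj
  rw [PySem.List.mem_pyRange_one] at hj
  rw [pvMod_eq]
  unfold pvFun
  rw [hPget j hj.1 hj.2]
  by_cases hji : j - i ≥ 0
  · rw [if_pos hji, hPget (j - i) hji (by omega)]
    rw [← Int.sub_emod]
  · rw [if_neg hji, pvPref_neg f (j - i) (by omega)]
    simp [Int.emod_emod_of_dvd]

-- invariant for A's inner fold
theorem pvStepA_inv (K : Nat) (f : List Int) (i : Int)
    (hf : f.length = K + 1) (hi : 1 ≤ i) :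
    ∀ t : Nat, t ≤ K + 1 →
      (PySem.List.pyRange 0 (t : Int) 1).foldl
        (fun g j =>
          let v : Int :=
            (if j - 1 ≥ 0 then PySem.List.pyGetD g (j - 1) 0 else 0)
              - (if j - i ≥ 0 then PySem.List.pyGetD f (j - i) 0 else 0)
              + PySem.List.pyGetD f j 0
          let g' := PySem.List.pySetD g j v
          PySem.List.pySetD g' j
            (PySem.Int.mod (PySem.List.pyGetD g' j 0) (10 ^ 9 + 7)))
        (List.replicate (K + 1) 0)
      = (PySem.List.pyRange 0 (t : Int) 1).map (pvFun f i)
          ++ List.replicate (K + 1 - t) 0 := by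
  intro t
  induction t with
  | zero => intro _; simp [PySem.List.pyRange_one_eq_nil]
  | succ t ih =>
    intro ht
    have ht' : t ≤ K + 1 := by omega
    have hcast : ((t + 1 : Nat) : Int) = (t : Int) + 1 := by push_cast; ring
    rw [hcast, PySem.List.pyRange_one_succ_right (by positivity),
        List.foldl_append, List.map_append, ih ht']
    simp only [List.foldl_cons, List.foldl_nil]
    set pre := (PySem.List.pyRange 0 (t : Int) 1).map (pvFun f i) with hpre
    have hprelen : pre.length = t := by
      simp [hpre, PySem.List.length_pyRange_one]
    have hrep : List.replicate (K + 1 - t) (0 : Int) = 0 :: List.replicate (K - t) 0 := by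
      have : K + 1 - t = (K - t) + 1 := by omega
      rw [this, List.replicate_succ]
    -- the value written before the %= step
    set v : Int :=
      (if (t : Int) - 1 ≥ 0 then PySem.List.pyGetD (pre ++ List.replicate (K + 1 - t) 0) ((t : Int) - 1) 0 else 0)
        - (if (t : Int) - i ≥ 0 then PySem.List.pyGetD f ((t : Int) - i) 0 else 0)
        + PySem.List.pyGetD f (t : Int) 0 with hv
    show PySem.List.pySetD (PySem.List.pySetD (pre ++ List.replicate (K + 1 - t) 0) (t : Int) v) (t : Int)
          (PySem.Int.mod (PySem.List.pyGetD (PySem.List.pySetD (pre ++ List.replicate (K + 1 - t) 0) (t : Int) v) (t : Int) 0) (10 ^ 9 + 7))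
        = (pre ++ List.map (pvFun f i) [(t : Int)]) ++ List.replicate (K + 1 - (t + 1)) 0
    have hset1 : PySem.List.pySetD (pre ++ List.replicate (K + 1 - t) 0) (t : Int) v
        = pre ++ v :: List.replicate (K - t) 0 := by
      rw [hrep, PySem.List.pySetD_of_nonneg _ _ (by positivity)]
      have htt : ((t : Int)).toNat = t := by omega
      rw [htt, List.set_append_right _ _ (by omega)]
      simp [hprelen]
    rw [hset1]
    have hget1 : PySem.List.pyGetD (pre ++ v :: List.replicate (K - t) 0) (t : Int) 0 = v := by
      rw [PySem.List.pyGetD_eq_getElem _ _ (by positivity)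
        (by simp [hprelen])]
      have htt : ((t : Int)).toNat = t := by omega
      simp only [htt]
      rw [List.getElem_append_right (by omega)]
      simp [hprelen]
    rw [hget1]
    have hset2 : PySem.List.pySetD (pre ++ v :: List.replicate (K - t) 0) (t : Int)
        (PySem.Int.mod v (10 ^ 9 + 7))
        = pre ++ (v % pvM) :: List.replicate (K - t) 0 := by
      rw [PySem.List.pySetD_of_nonneg _ _ (by positivity), pvMod_eq]
      have htt : ((t : Int)).toNat = t := by omega
      rw [htt, List.set_append_right _ _ (by omega)]
      simp [hprelen]
    rw [hset2]
    have hKt : K + 1 - (t + 1) = K - t := by omega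
    rw [hKt, List.append_assoc]
    congr 1
    simp only [List.map_cons, List.map_nil, List.singleton_append]
    congr 1
    -- now the arithmetic: v % pvM = pvFun f i t
    have hfun : pvFun f i (t : Int) = (pvPref f (t : Int) - pvPref f ((t : Int) - i)) % pvM := rfl
    rw [hfun]
    have htK : (t : Int) < f.length := by rw [hf]; push_cast; omega
    have hft : PySem.List.pyGetD f (t : Int) 0 = f.getD t 0 := by
      rw [PySem.List.pyGetD_eq_getElem _ _ (by positivity) htK]
      have h1 : ((t : Int)).toNat = t := by omega
      have h2 : t < f.length := by omega
      simp [h1, List.getD, List.getElem?_eq_getElem h2]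
    by_cases h0 : 1 ≤ (t : Int)
    · -- t ≥ 1 : the g[j-1] read hits the already-written prefix
      have ht1 : 1 ≤ t := by exact_mod_cast h0
      have hgread : PySem.List.pyGetD (pre ++ List.replicate (K + 1 - t) 0) ((t : Int) - 1) 0
          = pvFun f i ((t : Int) - 1) := by
        have hlt : ((t : Int) - 1).toNat < pre.length := by rw [hprelen]; omega
        rw [PySem.List.pyGetD_eq_getElem _ _ (by omega)
          (by simp [hprelen])]
        rw [List.getElem_append_left hlt]
        simp only [hpre, List.getElem_map]
        rw [PySem.List.getElem_pyRange_one]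
        congr 1
        have : ((t : Int) - 1).toNat = t - 1 := by omega
        rw [this]
        push_cast [Nat.cast_sub ht1]
        ring
      rw [hv, if_pos (by omega), hgread]
      simp only [pvFun]
      have hsum : ∀ X B C : Int, (X % pvM - B + C) % pvM = (X + (C - B)) % pvM := by
        intro X B C
        have h1 : X % pvM - B + C = X % pvM + (C - B) := by ring
        rw [h1, Int.emod_add_emod]
      by_cases hji : (t : Int) - i ≥ 0
      · rw [if_pos hji]
        have hfji : PySem.List.pyGetD f ((t : Int) - i) 0 = f.getD ((t : Int) - i).toNat 0 := by
          rw [PySem.List.pyGetD_eq_getElem _ _ hji (by omega)]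
          have h2 : ((t : Int) - i).toNat < f.length := by omega
          simp [List.getD, List.getElem?_eq_getElem h2]
        rw [hfji, hft, hsum]
        congr 1
        have e1 : pvPref f (t : Int) = pvPref f ((t : Int) - 1) + f.getD t 0 := by
          have := pvPref_succ f (t : Int) (by positivity) htK
          simpa using this
        have e2 : pvPref f ((t : Int) - i) = pvPref f ((t : Int) - i - 1) + f.getD ((t : Int) - i).toNat 0 := by
          exact pvPref_succ f _ hji (by omega)
        have e3 : (t : Int) - 1 - i = (t : Int) - i - 1 := by ring
        rw [e1, e2, e3]
        ring
      · rw [if_neg hji]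
        rw [hft, hsum]
        congr 1
        have e1 : pvPref f (t : Int) = pvPref f ((t : Int) - 1) + f.getD t 0 := by
          have := pvPref_succ f (t : Int) (by positivity) htK
          simpa using this
        rw [e1, pvPref_neg f ((t : Int) - i) (by omega),
            pvPref_neg f ((t : Int) - 1 - i) (by omega)]
        ring
    · -- t = 0
      have ht0 : t = 0 := by omega
      subst ht0
      rw [hv]
      simp only [Nat.cast_zero] at hft ⊢
      rw [if_neg (by omega), if_neg (by omega), hft]
      rw [pvPref_neg f (0 - i) (by omega)]
      have e1 : pvPref f 0 = pvPref f (-1) + f.getD 0 0 := by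
        have := pvPref_succ f 0 (le_refl _) (by omega)
        simpa using this
      rw [e1, pvPref_neg f (-1) (by omega)]
      ring_nf

theorem pvStepA_eq_row (K : Nat) (f : List Int) (i : Int)
    (hf : f.length = K + 1) (hi : 1 ≤ i) :
    pvStepA (K : Int) f i = pvRow (K : Int) f i := by
  unfold pvStepA pvRow
  have h := pvStepA_inv K f i hf hi (K + 1) (le_refl _)
  have hc : ((K + 1 : Nat) : Int) = (K : Int) + 1 := by push_cast; ring
  rw [hc] at h
  have hr2 : ((K : Int) + 1).toNat = K + 1 := by omega
  rw [hr2, h]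
  simp

-- ===== VERDICT (by name: the statement is the Claim_ definition above) =====
theorem kInversePairs_spec : Claim_equal_kInversePairs := by
  unfold Claim_equal_kInversePairs
  intro n k _ hpre
  unfold Spec_kInversePairs
  rcases hpre with hk | ⟨hk, hn⟩
  · -- k ≥ 0
    obtain ⟨K, hK⟩ : ∃ K : Nat, k = (K : Int) := ⟨k.toNat, by omega⟩
    subst hK
    rw [pvA_eq, pvB_eq]
    have hlen0 : (1 :: List.replicate (K : Int).toNat (0 : Int)).length = K + 1 := by
      simp
    have := pvFoldCongr (fun f : List Int => f.length = K + 1)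
      (fun f i => pvStepA (K : Int) f i) (fun f i => pvStepB (K : Int) f i)
      (PySem.List.pyRange 1 (n + 1) 1)
      (by
        intro f i hfl hmem
        rw [PySem.List.mem_pyRange_one] at hmem
        have hi : 1 ≤ i := hmem.1
        constructor
        · simp only [pvStepA_eq_row K f i hfl hi, pvStepB_eq_row K f i hfl hi]
        · simp only [pvStepA_eq_row K f i hfl hi]
          exact pvRow_length K f i)
      (1 :: List.replicate (K : Int).toNat 0) hlen0
    rw [this.1]
  · -- k = -1, n ≤ 0 : the outer range is empty in both ports
    subst hk
    rw [pvA_eq, pvB_eq, PySem.List.pyRange_one_eq_nil (by omega)]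
    simp
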